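-- pv_equiv track=rewrite | github.com/S4srihari/my_leetcode | 4176-minimum-k-to-reduce-array-within-limit/minimum-k-to-reduce-array-within-limit.py | minimumK
-- ===== SOURCE A (Python) =====
-- from typing import List
--
-- def minimumK(nums: List[int]) -> int:
--     left, right = 1, sum(nums)+1
--     ans = right
--
--     def possible(val):
--         tot = 0
--         for i in nums:
--             tot += (i+val-1)//val
--         return tot <= val**2
--
--     while left <= right:
--         mid = left + (right-left)//2
--
--         if possible(mid):
--             right = mid-1
--             ans = mid
--         else:
--             left = mid + 1
--
--     return ans
-- ===== SOURCE B (Python) =====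
-- from typing import List
--
-- def minimumK(nums: List[int]) -> int:
--     total = sum(nums)
--
--     def possible(val):
--         tot = 0
--         for i in nums:
--             tot += (i + val - 1) // val
--         return tot <= val ** 2
--
--     # k must satisfy k**3 >= total (since k * sum(ceil(i/k)) >= total),
--     # so start the scan at the integer cube-root bound instead of at 1.
--     k = 1
--     while k * k * k < total:
--         k += 1
--     while k <= total + 1:
--         if possible(k):
--             return k
--         k += 1
--     return total + 1
-- ===== Notes on version B (the rewrite author's own statement) =====
-- stated objective: alternative
-- what changed: A finds the minimum feasible k by binary search over [1, sum+1]; B instead starts at the algebraic lower bound k^3 >= sum (no k below it can be feasible, since k*sum(ceil(i/k)) >= sum) and scans linearly upward to the first feasible value.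
-- outside the precondition, e.g. on minimumK([30, -2, -2, -2, -2, -2, -2, -2, -2, -2, -2, -2, -2, -2]): A returns 4, B returns 2
import Mathlib
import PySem

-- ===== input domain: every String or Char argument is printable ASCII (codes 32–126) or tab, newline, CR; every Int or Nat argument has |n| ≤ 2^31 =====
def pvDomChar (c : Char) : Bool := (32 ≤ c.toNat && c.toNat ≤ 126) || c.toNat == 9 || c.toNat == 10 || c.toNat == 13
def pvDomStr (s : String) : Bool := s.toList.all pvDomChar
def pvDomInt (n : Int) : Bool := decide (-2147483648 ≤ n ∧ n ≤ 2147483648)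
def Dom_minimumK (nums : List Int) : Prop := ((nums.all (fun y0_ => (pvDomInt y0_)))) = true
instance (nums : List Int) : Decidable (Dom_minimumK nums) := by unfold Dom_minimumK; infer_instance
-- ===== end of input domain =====

-- B replaces A's binary search by an algebraic cube-root lower bound followed by a linear
-- scan for the first feasible value; equivalence is claimed on lists of nonnegative ints.

-- ===== PORT A =====
-- shared helper: both Pythons compute sum(nums) and define the identical `possible(val)`
def pvSum (nums : List Int) : Int := nums.foldl (· + ·) 0

def pvPossible (nums : List Int) (val : Int) : Bool :=
  decide ((nums.foldl (fun tot i => tot + PySem.Int.floordiv (i + val - 1) val) 0) ≤ val ^ 2)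

-- the `while left <= right` loop of A
def minimumKLoop (nums : List Int) (left right ans : Int) : Int :=
  if _h : left ≤ right then
    let mid := left + PySem.Int.floordiv (right - left) 2
    if pvPossible nums mid then minimumKLoop nums left (mid - 1) mid
    else minimumKLoop nums (mid + 1) right ans
  else ans
termination_by (right + 1 - left).toNat
decreasing_by
  all_goals
    rw [PySem.Int.floordiv_eq_ediv_of_pos (by norm_num)]
    omega

def minimumK (nums : List Int) : Int :=
  let s := pvSum nums
  minimumKLoop nums 1 (s + 1) (s + 1)

-- ===== PORT B =====
-- first while-loop of B: advance k (which starts at 1 and stays positive, hence Nat) while k*k*k < total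
def pvCbrtLoop (total : Int) (k : Nat) : Nat :=
  if (k : Int) * k * k < total then pvCbrtLoop total (k + 1) else k
termination_by total.toNat + 1 - k
decreasing_by
  rename_i h
  have hk : (k : Int) < total := by nlinarith [sq_nonneg ((k : Int) - 1), sq_nonneg (k : Int)]
  omega

-- second while-loop of B: scan upward for the first feasible value
def pvScanLoop (nums : List Int) (total k : Int) : Int :=
  if _h : k ≤ total + 1 then
    if pvPossible nums k then k else pvScanLoop nums total (k + 1)
  else total + 1
termination_by (total + 2 - k).toNat
decreasing_by omega

def minimumK_alt (nums : List Int) : Int :=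
  let total := pvSum nums
  pvScanLoop nums total ((pvCbrtLoop total 1 : Nat) : Int)

-- ===== PRECONDITION & SPEC =====
-- Pre_ admits the problem's natural domain (LeetCode guarantees nums[i] >= 1, here relaxed
-- to >= 0) plus every list with sum <= 1 (where both programs trivially agree): on the
-- remaining lists — a negative element and sum >= 2 — the feasibility predicate is not
-- monotone, so the value A's binary search returns is an accident of its probe order.
def Pre_minimumK (nums : List Int) : Prop := (∀ x ∈ nums, 0 ≤ x) ∨ nums.sum ≤ 1
instance (nums : List Int) : Decidable (Pre_minimumK nums) := by unfold Pre_minimumK; infer_instance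
def pvWitness_minimumK : List Int := [3, 0, 7, 2]

def Spec_minimumK (nums : List Int) (out : Int) : Prop := out = minimumK_alt nums
instance (nums : List Int) (out : Int) : Decidable (Spec_minimumK nums out) := by unfold Spec_minimumK; infer_instance

-- ===== CLAIM (what is proved, stated in full; the proofs are below) =====
def Claim_equal_minimumK : Prop := ∀ (nums : List Int), Dom_minimumK nums → Pre_minimumK nums → Spec_minimumK nums (minimumK nums)

-- ===== LEMMAS AND PROOFS =====

-- the least feasible value: both programs return the unique r with this property
def pvLF (nums : List Int) (r : Int) : Prop :=
  1 ≤ r ∧ pvPossible nums r = true ∧ ∀ k, 1 ≤ k → k < r → pvPossible nums k = false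

theorem pvLF_unique {nums : List Int} {r r' : Int} (h : pvLF nums r) (h' : pvLF nums r') : r = r' := by
  rcases h with ⟨h1, h2, h3⟩
  rcases h' with ⟨h1', h2', h3'⟩
  rcases lt_trichotomy r r' with hlt | heq | hgt
  · exact absurd (h3' r h1 hlt) (by simp [h2])
  · exact heq
  · exact absurd (h3 r' h1' hgt) (by simp [h2'])

-- the fold in possible() is 0 + Σ ceildiv
theorem pvTot_eq (nums : List Int) (v : Int) :
    nums.foldl (fun tot i => tot + PySem.Int.floordiv (i + v - 1) v) 0
      = (nums.map (fun i => PySem.Int.floordiv (i + v - 1) v)).sum := by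
  simpa using PySem.List.foldl_add (l := nums) (a := 0)
    (g := fun i => PySem.Int.floordiv (i + v - 1) v)

theorem pvSum_eq (nums : List Int) : pvSum nums = nums.sum := by
  rw [pvSum, List.sum_eq_foldl]

-- per-element: i ≤ v * ceil(i/v)
theorem pvCeil_mul_ge (i v : Int) (hv : 1 ≤ v) : i ≤ v * PySem.Int.floordiv (i + v - 1) v := by
  have hid := PySem.Int.floordiv_mul_add_mod (i + v - 1) v
  have hm := PySem.Int.mod_eq_emod_of_pos (a := i + v - 1) (b := v) (by omega)
  have h1 : 0 ≤ (i + v - 1) % v := Int.emod_nonneg _ (by omega)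
  have h2 : (i + v - 1) % v < v := Int.emod_lt_of_pos _ (by omega)
  nlinarith [hid]

-- per-element: ceil(i/v) ≥ 0 for i ≥ 0
theorem pvCeil_nonneg (i v : Int) (hi : 0 ≤ i) (hv : 1 ≤ v) :
    0 ≤ PySem.Int.floordiv (i + v - 1) v := by
  rw [PySem.Int.le_floordiv_iff_mul_le (by omega)]
  omega

-- per-element antitone in the divisor for nonnegative i
theorem pvCeil_anti (i v w : Int) (hi : 0 ≤ i) (hv : 1 ≤ v) (hvw : v ≤ w) :
    PySem.Int.floordiv (i + w - 1) w ≤ PySem.Int.floordiv (i + v - 1) v := by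
  set c := PySem.Int.floordiv (i + v - 1) v with hc
  have hc0 : 0 ≤ c := pvCeil_nonneg i v hi hv
  have hic : i ≤ v * c := pvCeil_mul_ge i v hv
  have hcw : v * c ≤ w * c := by nlinarith
  have : PySem.Int.floordiv (i + w - 1) w < c + 1 := by
    rw [PySem.Int.floordiv_lt_iff_lt_mul (by omega)]
    nlinarith
  omega

-- S ≤ v * tot(v)
theorem pvSum_le (nums : List Int) (v : Int) (hv : 1 ≤ v) :
    pvSum nums ≤ v * nums.foldl (fun tot i => tot + PySem.Int.floordiv (i + v - 1) v) 0 := by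
  rw [pvTot_eq, pvSum_eq, ← List.sum_map_mul_left]
  calc nums.sum = (nums.map id).sum := by simp
    _ ≤ (nums.map fun i => v * PySem.Int.floordiv (i + v - 1) v).sum :=
        List.sum_le_sum (fun i _ => pvCeil_mul_ge i v hv)

-- v³ < S → infeasible
theorem pvInfeasible_of_cube_lt (nums : List Int) (v : Int) (hv : 1 ≤ v)
    (h : v * v * v < pvSum nums) : pvPossible nums v = false := by
  have hs := pvSum_le nums v hv
  simp only [pvPossible, decide_eq_false_iff_not, not_le]
  nlinarith

-- monotone feasibility on nonnegative lists
theorem pvPossible_mono (nums : List Int) (hp : ∀ x ∈ nums, 0 ≤ x) (v w : Int)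
    (hv : 1 ≤ v) (hvw : v ≤ w) (h : pvPossible nums v = true) : pvPossible nums w = true := by
  simp only [pvPossible, decide_eq_true_eq] at h ⊢
  rw [pvTot_eq] at h ⊢
  have hmono : (nums.map fun i => PySem.Int.floordiv (i + w - 1) w).sum
      ≤ (nums.map fun i => PySem.Int.floordiv (i + v - 1) v).sum :=
    List.sum_le_sum (fun i hi => pvCeil_anti i v w (hp i hi) hv hvw)
  nlinarith

theorem pvSum_nonneg (nums : List Int) (hp : ∀ x ∈ nums, 0 ≤ x) : 0 ≤ pvSum nums := by
  rw [pvSum_eq]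
  exact List.sum_nonneg hp

-- feasibility of S+1 on nonnegative lists
theorem pvPossible_top (nums : List Int) (hp : ∀ x ∈ nums, 0 ≤ x) :
    pvPossible nums (pvSum nums + 1) = true := by
  have hS : 0 ≤ pvSum nums := pvSum_nonneg nums hp
  simp only [pvPossible, decide_eq_true_eq]
  rw [pvTot_eq]
  have h1 : (nums.map fun i => PySem.Int.floordiv (i + (pvSum nums + 1) - 1) (pvSum nums + 1)).sum
      ≤ (nums.map fun i => PySem.Int.floordiv (i + 1 - 1) 1).sum :=
    List.sum_le_sum (fun i hi => pvCeil_anti i 1 (pvSum nums + 1) (hp i hi) le_rfl (by omega))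
  have h2 : (nums.map fun i => PySem.Int.floordiv (i + 1 - 1) 1).sum = pvSum nums := by
    rw [pvSum_eq]
    congr 1
    refine List.map_congr_left (fun i _ => ?_) |>.trans (List.map_id _)
    rw [PySem.Int.floordiv_eq_ediv_of_pos (by norm_num)]
    simp
  rw [h2] at h1
  nlinarith

-- on lists with sum <= 1 both programs return immediately with the same value
theorem pvTot_one (nums : List Int) :
    (nums.map fun i => PySem.Int.floordiv (i + 1 - 1) 1).sum = nums.sum := by
  congr 1
  refine List.map_congr_left (fun i _ => ?_) |>.trans (List.map_id _)
  rw [PySem.Int.floordiv_eq_ediv_of_pos (by norm_num)]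
  simp

theorem pvPossible_one (nums : List Int) (hs : nums.sum ≤ 1) : pvPossible nums 1 = true := by
  simp only [pvPossible, decide_eq_true_eq]
  rw [pvTot_eq, pvTot_one]
  norm_num
  omega

theorem pvEq_of_sum_le_one (nums : List Int) (hs : nums.sum ≤ 1) :
    minimumK nums = minimumK_alt nums := by
  unfold minimumK minimumK_alt
  simp only [pvSum_eq]
  by_cases h0 : nums.sum ≤ -1
  · -- both searches are over the empty range [1, sum+1] and fall back to sum+1
    rw [minimumKLoop.eq_def, dif_neg (by omega)]
    rw [pvCbrtLoop.eq_def, if_neg (by push_cast; omega)]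
    rw [pvScanLoop.eq_def, dif_neg (by push_cast; omega)]
  · -- sum = 0 or sum = 1: the first probed value is 1, which is feasible
    have hp1 := pvPossible_one nums hs
    have hmidA : ∀ r : Int, (1 : Int) + PySem.Int.floordiv (r - 1) 2 = 1 + (r - 1) / 2 := by
      intro r
      rw [PySem.Int.floordiv_eq_ediv_of_pos (by norm_num)]
    rw [minimumKLoop.eq_def, dif_pos (by omega)]
    simp only [hmidA]
    have hmid1 : (1 : Int) + (nums.sum + 1 - 1) / 2 = 1 := by omega
    rw [hmid1, if_pos hp1]
    rw [minimumKLoop.eq_def, dif_neg (by omega)]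
    rw [pvCbrtLoop.eq_def, if_neg (by push_cast; omega)]
    rw [pvScanLoop.eq_def, dif_pos (by push_cast; omega)]
    push_cast
    rw [if_pos hp1]

-- A's loop returns the least feasible value
theorem pvLoopA_LF (nums : List Int) (hp : ∀ x ∈ nums, 0 ≤ x) :
    ∀ left right ans : Int, 1 ≤ left → right ≤ pvSum nums + 1 →
      (∀ k, 1 ≤ k → k < left → pvPossible nums k = false) →
      ((ans = right + 1 ∧ 1 ≤ ans ∧ pvPossible nums ans = true) ∨ (right = pvSum nums + 1 ∧ ans = pvSum nums + 1)) →
      pvLF nums (minimumKLoop nums left right ans) := by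
  intro left right ans
  fun_induction minimumKLoop nums left right ans with
  | case1 left right ans hlr mid hposs ih =>
    intro h1 h2 h3 _h4
    have hmid : left ≤ mid ∧ mid ≤ right := by
      constructor <;>
        · simp only [mid, PySem.Int.floordiv_eq_ediv_of_pos (a := right - left) (b := 2) (by norm_num)]
          omega
    exact ih h1 (by omega) h3 (Or.inl ⟨by omega, by omega, hposs⟩)
  | case2 left right ans hlr mid hposs ih =>
    intro h1 h2 h3 h4
    have hmid : left ≤ mid ∧ mid ≤ right := by
      constructor <;>
        · simp only [mid, PySem.Int.floordiv_eq_ediv_of_pos (a := right - left) (b := 2) (by norm_num)]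
          omega
    refine ih (by omega) h2 ?_ h4
    intro k hk1 hk2
    by_cases hkl : k < left
    · exact h3 k hk1 hkl
    · by_contra hkp
      have := pvPossible_mono nums hp k mid hk1 (by omega) (by simpa using hkp)
      simp [hposs] at this
  | case3 left right ans hlr =>
    intro h1 h2 h3 h4
    rcases h4 with ⟨ha, hans, hposs⟩ | ⟨hr, ha⟩
    · refine ⟨by omega, hposs, fun k hk1 hk2 => h3 k hk1 (by omega)⟩
    · exfalso
      have htop := pvPossible_top nums hp
      have := h3 (pvSum nums + 1) (by have := pvSum_nonneg nums hp; omega) (by omega)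
      simp [htop] at this

-- B's cbrt loop: result ≥ start, and everything in [start, result) has cube < total
theorem pvCbrtLoop_ge (total : Int) (k : Nat) : k ≤ pvCbrtLoop total k := by
  fun_induction pvCbrtLoop total k with
  | case1 k h ih => omega
  | case2 k h => omega

theorem pvCbrtLoop_below (total : Int) (k : Nat) :
    ∀ j : Nat, k ≤ j → j < pvCbrtLoop total k → (j : Int) * j * j < total := by
  fun_induction pvCbrtLoop total k with
  | case1 k h ih =>
    intro j hj1 hj2
    rcases Nat.eq_or_lt_of_le hj1 with heq | hlt
    · simpa [← heq] using h
    · exact ih j hlt hj2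
  | case2 k h =>
    intro j hj1 hj2
    omega

-- B's scan loop returns the least feasible value
theorem pvScan_LF (nums : List Int) (hp : ∀ x ∈ nums, 0 ≤ x) :
    ∀ k : Int, 1 ≤ k → k ≤ pvSum nums + 1 →
      (∀ j, 1 ≤ j → j < k → pvPossible nums j = false) →
      pvLF nums (pvScanLoop nums (pvSum nums) k) := by
  intro k
  fun_induction pvScanLoop nums (pvSum nums) k with
  | case1 k hk hposs =>
    intro h1 _h2 h3
    exact ⟨h1, hposs, h3⟩
  | case2 k hk hposs ih =>
    intro h1 h2 h3
    have hkS : k ≠ pvSum nums + 1 := by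
      intro heq
      have := pvPossible_top nums hp
      rw [← heq] at this
      simp [hposs] at this
    refine ih (by omega) (by omega) ?_
    intro j hj1 hj2
    by_cases hjk : j < k
    · exact h3 j hj1 hjk
    · have : j = k := by omega
      simpa [this] using hposs
  | case3 k hk =>
    intro h1 h2 h3
    omega

-- ===== VERDICT (by name: the statement is the Claim_ definition above) =====
theorem minimumK_spec : Claim_equal_minimumK := by
  intro nums _hdom hpre
  unfold Spec_minimumK
  rcases hpre with hp | hs
  case inr => exact pvEq_of_sum_le_one nums hs
  have hS : 0 ≤ pvSum nums := pvSum_nonneg nums hp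
  have hA : pvLF nums (minimumK nums) := by
    unfold minimumK
    exact pvLoopA_LF nums hp 1 (pvSum nums + 1) (pvSum nums + 1) le_rfl le_rfl
      (fun k hk1 hk2 => absurd (lt_of_le_of_lt hk1 hk2) (lt_irrefl 1))
      (Or.inr ⟨rfl, rfl⟩)
  have hB : pvLF nums (minimumK_alt nums) := by
    unfold minimumK_alt
    set k0 : Nat := pvCbrtLoop (pvSum nums) 1 with hk0
    have hk01 : 1 ≤ k0 := pvCbrtLoop_ge (pvSum nums) 1
    have hbelow : ∀ j : Int, 1 ≤ j → j < (k0 : Int) → pvPossible nums j = false := by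
      intro j hj1 hj2
      have hjn : ((j.toNat : Int)) = j := Int.toNat_of_nonneg (by omega)
      have hcube : (j.toNat : Int) * j.toNat * j.toNat < pvSum nums :=
        pvCbrtLoop_below (pvSum nums) 1 j.toNat (by omega) (by omega)
      rw [hjn] at hcube
      exact pvInfeasible_of_cube_lt nums j hj1 hcube
    have hk0S : (k0 : Int) ≤ pvSum nums + 1 := by
      by_cases h1 : k0 = 1
      · rw [h1]; omega
      · have hcube : ((k0 - 1 : Nat) : Int) * ((k0 - 1 : Nat) : Int) * ((k0 - 1 : Nat) : Int) < pvSum nums :=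
          pvCbrtLoop_below (pvSum nums) 1 (k0 - 1) (by omega) (by omega)
        have hm : (1 : Int) ≤ ((k0 - 1 : Nat) : Int) := by omega
        have hself : ((k0 - 1 : Nat) : Int) ≤ ((k0 - 1 : Nat) : Int) * ((k0 - 1 : Nat) : Int) * ((k0 - 1 : Nat) : Int) := by
          nlinarith
        omega
    exact pvScan_LF nums hp (k0 : Int) (by exact_mod_cast hk01) hk0S hbelow
  exact pvLF_unique hA hB
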